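-- pv_equiv track=rewrite | github.com/asibic/glassalpha | packages/src/glassalpha/models/tabular/lightgbm.py | _sanitize_feature_names
-- ===== SOURCE A (Python) =====
-- def _sanitize_feature_names(feature_names: list[str]) -> tuple[list[str], dict[str, str]]:
--     """Sanitize feature names for LightGBM compatibility.
--
--     LightGBM doesn't accept special JSON characters in feature names.
--     This method replaces problematic characters with safe alternatives.
--
--     Args:
--         feature_names: Original feature names
--
--     Returns:
--         Tuple of (sanitized_names, mapping from original to sanitized)
--
--     """
--     # Characters that need to be replaced
--     replacements = {
--         "=": "_eq_",
--         "<": "_lt_",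
--         ">": "_gt_",
--         ".": "_",
--         ":": "_",
--         '"': "_",
--         "[": "_",
--         "]": "_",
--         "{": "_",
--         "}": "_",
--         ",": "_",
--         " ": "_",
--     }
--
--     sanitized = []
--     mapping = {}
--
--     for name in feature_names:
--         sanitized_name = name
--         for char, replacement in replacements.items():
--             sanitized_name = sanitized_name.replace(char, replacement)
--
--         # Remove duplicate underscores
--         while "__" in sanitized_name:
--             sanitized_name = sanitized_name.replace("__", "_")
--
--         # Remove leading/trailing underscores
--         sanitized_name = sanitized_name.strip("_")
--
--         sanitized.append(sanitized_name)
--         mapping[name] = sanitized_name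
--
--     return sanitized, mapping
-- ===== SOURCE B (Python) =====
-- def _sanitize_feature_names(feature_names):
--     # single character-level pass: map each char through a lookup table while
--     # collapsing consecutive underscores on the fly, then strip edge underscores
--     table = {
--         "=": "_eq_",
--         "<": "_lt_",
--         ">": "_gt_",
--         ".": "_",
--         ":": "_",
--         '"': "_",
--         "[": "_",
--         "]": "_",
--         "{": "_",
--         "}": "_",
--         ",": "_",
--         " ": "_",
--     }
--     sanitized = []
--     mapping = {}
--     for name in feature_names:
--         out = ""
--         prev_us = False
--         for ch in name:
--             for c in table.get(ch, ch):
--                 if c == "_" and prev_us: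
--                     continue
--                 out += c
--                 prev_us = c == "_"
--         out = out.strip("_")
--         sanitized.append(out)
--         mapping[name] = out
--     return sanitized, mapping
-- ===== Notes on version B (the rewrite author's own statement) =====
-- stated objective: alternative
-- what changed: Per name, the twelve sequential full-string .replace passes plus the repeated '__'-collapsing replace passes are fused into one character-level pass using a per-char lookup table and an on-the-fly previous-was-underscore flag, followed by the same strip('_').
import Mathlib
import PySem

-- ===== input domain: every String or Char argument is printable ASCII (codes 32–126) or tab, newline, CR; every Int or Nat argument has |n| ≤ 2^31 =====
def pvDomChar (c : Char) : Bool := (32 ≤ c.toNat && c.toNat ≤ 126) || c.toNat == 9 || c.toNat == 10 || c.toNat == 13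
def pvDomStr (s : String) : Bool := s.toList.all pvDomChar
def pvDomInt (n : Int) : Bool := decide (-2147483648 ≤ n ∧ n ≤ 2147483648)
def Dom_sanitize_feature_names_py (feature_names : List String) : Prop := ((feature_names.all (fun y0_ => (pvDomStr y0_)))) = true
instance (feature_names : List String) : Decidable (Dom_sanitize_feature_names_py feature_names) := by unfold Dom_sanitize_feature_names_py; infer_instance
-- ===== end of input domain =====

-- B replaces A's twelve sequential full-string `.replace` passes and the repeated
-- `"__"`-collapsing replace passes by ONE character-level pass per name (lookup table
-- plus on-the-fly underscore collapsing); objective: alternative single-pass algorithm.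


-- ===== PORT A =====

-- `replacements` dict literal: 12 distinct keys, so `.items()` is exactly this list in insertion order
def pvReplacements : List (String × String) :=
  [("=", "_eq_"), ("<", "_lt_"), (">", "_gt_"), (".", "_"), (":", "_"), ("\"", "_"),
   ("[", "_"), ("]", "_"), ("{", "_"), ("}", "_"), (",", "_"), (" ", "_")]

-- spec of one `s.replace("__", "_")` pass, used only for the termination proof of the while loop
def pvRep : List Char → List Char
  | [] => []
  | [c] => [c]
  | c :: d :: cs => if c = '_' ∧ d = '_' then '_' :: pvRep cs else c :: pvRep (d :: cs)

def pvHasDbl : List Char → Bool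
  | [] => false
  | [_] => false
  | c :: d :: cs => if c = '_' ∧ d = '_' then true else pvHasDbl (d :: cs)

theorem pvGo_dbl (l : List Char) : ∀ (fuel : Nat) (acc : List Char), l.length ≤ fuel →
    PySem.Chars.replace.go ['_', '_'] ['_'] fuel l acc = acc.reverse ++ pvRep l := by
  induction l using pvRep.induct with
  | case1 =>
    intro fuel acc h
    match fuel with
    | 0 => simp [PySem.Chars.replace.go, pvRep]
    | fuel + 1 => simp [PySem.Chars.replace.go, pvRep]
  | case2 c =>
    intro fuel acc h
    match fuel with
    | fuel + 1 =>
      have hpre : List.isPrefixOf ['_', '_'] [c] = false := by simp [List.isPrefixOf]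
      have hstep : PySem.Chars.replace.go ['_', '_'] ['_'] (fuel + 1) [c] acc
          = PySem.Chars.replace.go ['_', '_'] ['_'] fuel [] (c :: acc) := by
        simp [PySem.Chars.replace.go, hpre]
      rw [hstep]
      match fuel with
      | 0 => simp [PySem.Chars.replace.go, pvRep]
      | fuel + 1 => simp [PySem.Chars.replace.go, pvRep]
  | case3 c d cs hcd ih =>
    intro fuel acc h
    match fuel with
    | fuel + 1 =>
      obtain ⟨hc, hd⟩ := hcd
      subst hc; subst hd
      have hstep : PySem.Chars.replace.go ['_', '_'] ['_'] (fuel + 1) ('_' :: '_' :: cs) acc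
          = PySem.Chars.replace.go ['_', '_'] ['_'] fuel cs ('_' :: acc) := by
        simp [PySem.Chars.replace.go, List.isPrefixOf]
      rw [hstep, ih fuel ('_' :: acc) (by simp only [List.length_cons] at h; omega)]
      simp [pvRep]
  | case4 c d cs hcd ih =>
    intro fuel acc h
    match fuel with
    | fuel + 1 =>
      have hpre : List.isPrefixOf ['_', '_'] (c :: d :: cs) = false := by
        by_cases hc : c = '_'
        · have hd : d ≠ '_' := fun hd => hcd ⟨hc, hd⟩
          have hbd : ('_' == d) = false := by simpa using fun hx => hd hx.symm
          simp [List.isPrefixOf, hc, hbd]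
        · have hbc : ('_' == c) = false := by simpa using fun hx => hc hx.symm
          simp [List.isPrefixOf, hbc]
      have hstep : PySem.Chars.replace.go ['_', '_'] ['_'] (fuel + 1) (c :: d :: cs) acc
          = PySem.Chars.replace.go ['_', '_'] ['_'] fuel (d :: cs) (c :: acc) := by
        simp [PySem.Chars.replace.go, hpre]
      rw [hstep, ih fuel (c :: acc) (by simp only [List.length_cons] at h ⊢; omega)]
      simp [pvRep, hcd]

theorem pvReplace_dbl (l : List Char) : PySem.Chars.replace l ['_', '_'] ['_'] = pvRep l := by
  rw [PySem.Chars.replace, if_neg (by simp)]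
  simpa using pvGo_dbl l l.length [] le_rfl

theorem pvRep_len_le (l : List Char) : (pvRep l).length ≤ l.length := by
  induction l using pvRep.induct with
  | case1 => simp [pvRep]
  | case2 c => simp [pvRep]
  | case3 c d cs hcd ih => simp [pvRep, hcd]; omega
  | case4 c d cs hcd ih => simp [pvRep, hcd] at ih ⊢; omega

theorem pvRep_len_lt (l : List Char) (h : pvHasDbl l = true) : (pvRep l).length < l.length := by
  induction l using pvRep.induct with
  | case1 => simp [pvHasDbl] at h
  | case2 c => simp [pvHasDbl] at h
  | case3 c d cs hcd ih =>
    have := pvRep_len_le cs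
    simp [pvRep, hcd]; omega
  | case4 c d cs hcd ih =>
    rw [pvHasDbl, if_neg hcd] at h
    have := ih h
    simp [pvRep, hcd] at this ⊢; omega

theorem pvInfix_iff_hasDbl (l : List Char) : (['_', '_'] <:+: l) ↔ pvHasDbl l = true := by
  induction l using pvHasDbl.induct with
  | case1 => simp [pvHasDbl, List.infix_nil]
  | case2 c =>
    simp only [pvHasDbl]
    constructor
    · intro hinf
      have := hinf.length_le
      simp at this
    · simp
  | case3 c d cs hcd =>
    obtain ⟨hc, hd⟩ := hcd; subst hc; subst hd
    rw [pvHasDbl, if_pos ⟨rfl, rfl⟩]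
    exact iff_of_true ⟨[], cs, rfl⟩ rfl
  | case4 c d cs hcd ih =>
    rw [pvHasDbl, if_neg hcd, ← ih, List.infix_cons_iff]
    constructor
    · rintro (hp | hi)
      · rcases hp with ⟨t, ht⟩
        injection ht with h1 h2
        injection h2 with h3 h4
        exact absurd ⟨h1.symm, h3.symm⟩ hcd
      · exact hi
    · exact Or.inr

-- termination argument cited by the port's while loop
theorem pvCollapse_dec (s : String) (h : PySem.Str.isIn "__" s = true) :
    (PySem.Str.replace s "__" "_").toList.length < s.toList.length := by
  have hinf : ['_', '_'] <:+: s.toList := by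
    simpa using (PySem.Str.isIn_iff_infix (sub := "__") (s := s)).mp h
  have : (PySem.Str.replace s "__" "_").toList = pvRep s.toList := by
    simp [PySem.Str.replace, pvReplace_dbl]
  rw [this]
  exact pvRep_len_lt _ ((pvInfix_iff_hasDbl _).mp hinf)

-- `while "__" in sanitized_name: sanitized_name = sanitized_name.replace("__", "_")`
def pvCollapseLoopA (s : String) : String :=
  if h : PySem.Str.isIn "__" s = true then pvCollapseLoopA (PySem.Str.replace s "__" "_") else s
termination_by s.toList.length
decreasing_by exact pvCollapse_dec s h

-- the body of A's `for name in feature_names` loop, producing `sanitized_name`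
def pvSanA (name : String) : String :=
  let s := pvReplacements.foldl (fun acc kv => PySem.Str.replace acc kv.1 kv.2) name
  PySem.Str.stripChars (pvCollapseLoopA s) "_"

def sanitize_feature_names_py (feature_names : List String) : List String × (List (String × String)) :=
  let res := feature_names.foldl
    (fun (acc : List String × PySem.Dict String String) name =>
      let sn := pvSanA name
      (acc.1 ++ [sn], acc.2.insert name sn))
    ([], PySem.Dict.mk [])
  (res.1, res.2.items)

-- ===== PORT B =====

-- `table.get(ch, ch)` from Source B, as a lookup function on the char
def pvTable (ch : Char) : List Char :=
  if ch == '=' then ['_', 'e', 'q', '_']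
  else if ch == '<' then ['_', 'l', 't', '_']
  else if ch == '>' then ['_', 'g', 't', '_']
  else if ch == '.' || ch == ':' || ch == '"' || ch == '[' || ch == ']' ||
          ch == '{' || ch == '}' || ch == ',' || ch == ' ' then ['_']
  else [ch]

-- `if c == "_" and prev_us: continue; out += c; prev_us = c == "_"` — the inner loop body
def pvCStep (st : List Char × Bool) (c : Char) : List Char × Bool :=
  if c == '_' && st.2 then st else (st.1 ++ [c], c == '_')

-- the inner `for c in table.get(ch, ch)` loop: state = (out, prev_us)
def pvStepB (st : List Char × Bool) (ch : Char) : List Char × Bool :=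
  (pvTable ch).foldl pvCStep st

-- the body of Source B's `for name in feature_names` loop
def pvSanB (name : String) : String :=
  let st := name.toList.foldl pvStepB ([], false)
  PySem.Str.stripChars (String.ofList st.1) "_"

def sanitize_feature_names_py_alt (feature_names : List String) : List String × (List (String × String)) :=
  let res := feature_names.foldl
    (fun (acc : List String × PySem.Dict String String) name =>
      let sn := pvSanB name
      (acc.1 ++ [sn], acc.2.insert name sn))
    ([], PySem.Dict.mk [])
  (res.1, res.2.items)

-- ===== PRECONDITION & SPEC =====
def Spec_sanitize_feature_names_py (feature_names : List String) (out : List String × (List (String × String))) : Prop := out = sanitize_feature_names_py_alt feature_names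
instance (feature_names : List String) (out : List String × (List (String × String))) : Decidable (Spec_sanitize_feature_names_py feature_names out) := by unfold Spec_sanitize_feature_names_py; infer_instance

-- ===== CLAIM (what is proved, stated in full; the proofs are below) =====
def Claim_equal_sanitize_feature_names_py : Prop := ∀ (feature_names : List String), Dom_sanitize_feature_names_py feature_names → Spec_sanitize_feature_names_py feature_names (sanitize_feature_names_py feature_names)

-- ===== LEMMAS AND PROOFS =====

-- single-char-pattern replace is a per-char substitution
def pvSub (k : Char) (r : List Char) (l : List Char) : List Char :=
  l.flatMap (fun d => if d == k then r else [d])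

theorem pvGo_single (k : Char) (r : List Char) (l : List Char) :
    ∀ (fuel : Nat) (acc : List Char), l.length ≤ fuel →
    PySem.Chars.replace.go [k] r fuel l acc = acc.reverse ++ pvSub k r l := by
  induction l with
  | nil =>
    intro fuel acc h
    match fuel with
    | 0 => simp [PySem.Chars.replace.go, pvSub]
    | fuel + 1 => simp [PySem.Chars.replace.go, pvSub]
  | cons d cs ih =>
    intro fuel acc h
    match fuel with
    | fuel + 1 =>
      by_cases hd : d = k
      · have hstep : PySem.Chars.replace.go [k] r (fuel + 1) (d :: cs) acc
            = PySem.Chars.replace.go [k] r fuel cs (r.reverse ++ acc) := by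
          simp [PySem.Chars.replace.go, List.isPrefixOf, hd]
        rw [hstep, ih fuel (r.reverse ++ acc) (by simp only [List.length_cons] at h; omega)]
        simp [pvSub, hd]
      · have hkd : (k == d) = false := by simpa using fun hx => hd hx.symm
        have hstep : PySem.Chars.replace.go [k] r (fuel + 1) (d :: cs) acc
            = PySem.Chars.replace.go [k] r fuel cs (d :: acc) := by
          simp [PySem.Chars.replace.go, List.isPrefixOf, hkd]
        rw [hstep, ih fuel (d :: acc) (by simp only [List.length_cons] at h; omega)]
        simp [pvSub, hd]

theorem pvReplace_single (k : Char) (r : List Char) (l : List Char) :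
    PySem.Chars.replace l [k] r = pvSub k r l := by
  rw [PySem.Chars.replace, if_neg (by simp)]
  simpa using pvGo_single k r l l.length [] le_rfl

theorem pvSub_flatMap (k : Char) (r : List Char) (g : Char → List Char) (l : List Char) :
    pvSub k r (l.flatMap g) = l.flatMap (fun c => pvSub k r (g c)) := by
  simp [pvSub, List.flatMap_assoc]

-- what the chain of twelve substitutions does to a single character
theorem pvPerChar (c : Char) :
    pvSub ' ' ['_'] (pvSub ',' ['_'] (pvSub '}' ['_'] (pvSub '{' ['_'] (pvSub ']' ['_']
      (pvSub '[' ['_'] (pvSub '"' ['_'] (pvSub ':' ['_'] (pvSub '.' ['_']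
      (pvSub '>' ['_', 'g', 't', '_'] (pvSub '<' ['_', 'l', 't', '_']
      (pvSub '=' ['_', 'e', 'q', '_'] [c]))))))))))) = pvTable c := by
  by_cases h1 : c = '='; · subst h1; decide
  by_cases h2 : c = '<'; · subst h2; decide
  by_cases h3 : c = '>'; · subst h3; decide
  by_cases h4 : c = '.'; · subst h4; decide
  by_cases h5 : c = ':'; · subst h5; decide
  by_cases h6 : c = '"'; · subst h6; decide
  by_cases h7 : c = '['; · subst h7; decide
  by_cases h8 : c = ']'; · subst h8; decide
  by_cases h9 : c = '{'; · subst h9; decide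
  by_cases h10 : c = '}'; · subst h10; decide
  by_cases h11 : c = ','; · subst h11; decide
  by_cases h12 : c = ' '; · subst h12; decide
  simp [pvSub, pvTable, h1, h2, h3, h4, h5, h6, h7, h8, h9, h10, h11, h12]

-- A's twelve sequential replaces equal one flatMap through the lookup table
theorem pvChainA (name : String) :
    (pvReplacements.foldl (fun acc kv => PySem.Str.replace acc kv.1 kv.2) name).toList
      = name.toList.flatMap pvTable := by
  simp only [pvReplacements, List.foldl_cons, List.foldl_nil]
  simp only [PySem.Str.replace, String.toList_ofList]
  simp only [show "=".toList = ['='] from rfl, show "<".toList = ['<'] from rfl,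
    show ">".toList = ['>'] from rfl, show ".".toList = ['.'] from rfl,
    show ":".toList = [':'] from rfl, show "\"".toList = ['"'] from rfl,
    show "[".toList = ['['] from rfl, show "]".toList = [']'] from rfl,
    show "{".toList = ['{'] from rfl, show "}".toList = ['}'] from rfl,
    show ",".toList = [','] from rfl, show " ".toList = [' '] from rfl,
    show "_".toList = ['_'] from rfl, show "_eq_".toList = ['_', 'e', 'q', '_'] from rfl,
    show "_lt_".toList = ['_', 'l', 't', '_'] from rfl,
    show "_gt_".toList = ['_', 'g', 't', '_'] from rfl]
  simp only [pvReplace_single]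
  conv_lhs => rw [← List.flatMap_singleton' name.toList]
  rw [pvSub_flatMap '=']
  rw [pvSub_flatMap '<', pvSub_flatMap '>', pvSub_flatMap '.', pvSub_flatMap ':',
     pvSub_flatMap '"', pvSub_flatMap '[', pvSub_flatMap ']', pvSub_flatMap '{',
     pvSub_flatMap '}', pvSub_flatMap ',', pvSub_flatMap ' ']
  simp only [pvPerChar]

-- reference collapse: output chars and final prev_us flag
def pvColS : Bool → List Char → List Char × Bool
  | prev, [] => ([], prev)
  | prev, c :: cs =>
    if c == '_' && prev then pvColS prev cs
    else ((pvColS (c == '_') cs).1.cons c, (pvColS (c == '_') cs).2)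

theorem pvColS_append (prev : Bool) (xs ys : List Char) :
    pvColS prev (xs ++ ys)
      = ((pvColS prev xs).1 ++ (pvColS (pvColS prev xs).2 ys).1,
         (pvColS (pvColS prev xs).2 ys).2) := by
  induction xs generalizing prev with
  | nil => simp [pvColS]
  | cons c cs ih =>
    by_cases h : (c == '_' && prev) = true
    · simp [pvColS, h, ih]
    · simp [pvColS, h, ih]

-- Source B's inner char loop computes pvColS, appending to `out`
theorem pvInner_colS (cs : List Char) : ∀ (out : List Char) (prev : Bool),
    cs.foldl pvCStep (out, prev) = (out ++ (pvColS prev cs).1, (pvColS prev cs).2) := by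
  induction cs with
  | nil => intro out prev; simp [pvColS]
  | cons c cs ih =>
    intro out prev
    by_cases h : (c == '_' && prev) = true
    · rw [List.foldl_cons, show pvCStep (out, prev) c = (out, prev) from by simp [pvCStep, h], ih]
      simp [pvColS, h]
    · rw [List.foldl_cons,
        show pvCStep (out, prev) c = (out ++ [c], c == '_') from by simp [pvCStep, h], ih]
      simp [pvColS, h]

-- Source B's outer char loop over `name` computes pvColS of the flat-mapped chars
theorem pvOuter_colS (cs : List Char) : ∀ (out : List Char) (prev : Bool),
    cs.foldl pvStepB (out, prev)
      = (out ++ (pvColS prev (cs.flatMap pvTable)).1, (pvColS prev (cs.flatMap pvTable)).2) := by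
  induction cs with
  | nil => intro out prev; simp [pvColS]
  | cons c cs ih =>
    intro out prev
    show List.foldl pvStepB (pvStepB (out, prev) c) cs = _
    rw [pvStepB, pvInner_colS]
    rw [ih]
    simp [List.flatMap_cons, pvColS_append]

-- one `"__" → "_"` pass does not change the collapsed form
theorem pvColS_rep (l : List Char) : ∀ (prev : Bool), pvColS prev (pvRep l) = pvColS prev l := by
  induction l using pvRep.induct with
  | case1 => intro prev; simp [pvRep]
  | case2 c => intro prev; simp [pvRep]
  | case3 c d cs hcd ih =>
    intro prev
    obtain ⟨hc, hd⟩ := hcd; subst hc; subst hd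
    rw [show pvRep ('_' :: '_' :: cs) = '_' :: pvRep cs from by simp [pvRep]]
    cases prev
    · simp [pvColS, ih]
    · simp [pvColS, ih]
  | case4 c d cs hcd ih =>
    intro prev
    rw [show pvRep (c :: d :: cs) = c :: pvRep (d :: cs) from by simp [pvRep, hcd]]
    by_cases h : (c == '_' && prev) = true
    · simp [pvColS, h, ih]
    · simp [pvColS, h, ih]

-- a string without "__" is already collapsed
theorem pvColS_fix (l : List Char) : ∀ (prev : Bool), pvHasDbl l = false →
    (prev = true → l.head? ≠ some '_') → (pvColS prev l).1 = l := by
  induction l with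
  | nil => intro prev _ _; simp [pvColS]
  | cons c cs ih =>
    intro prev hdbl hhd
    by_cases hc : c = '_'
    · subst hc
      have hprev : prev = false := by
        cases prev with
        | false => rfl
        | true => exact absurd rfl (hhd rfl)
      subst hprev
      have hcs : pvHasDbl cs = false ∧ (cs.head? ≠ some '_') := by
        cases cs with
        | nil => simp [pvHasDbl] at hdbl ⊢
        | cons d cs' =>
          by_cases hd : d = '_'
          · subst hd; simp [pvHasDbl] at hdbl
          · have : pvHasDbl ('_' :: d :: cs') = pvHasDbl (d :: cs') := by
              rw [pvHasDbl, if_neg (by simp [hd])]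
            rw [this] at hdbl
            exact ⟨hdbl, by simpa using hd⟩
      show (pvColS false ('_' :: cs)).1 = '_' :: cs
      have e : (pvColS false ('_' :: cs)).1 = '_' :: (pvColS true cs).1 := by simp [pvColS]
      rw [e, ih true hcs.1 (fun _ => hcs.2)]
    · have hcs : pvHasDbl cs = false := by
        cases cs with
        | nil => simp [pvHasDbl]
        | cons d cs' =>
          have : pvHasDbl (c :: d :: cs') = pvHasDbl (d :: cs') := by
            rw [pvHasDbl, if_neg (by simp [hc])]
          rw [this] at hdbl
          exact hdbl
      show (pvColS prev (c :: cs)).1 = c :: cs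
      have hb : (c == '_') = false := by simpa using hc
      have e : (pvColS prev (c :: cs)).1 = c :: (pvColS false cs).1 := by simp [pvColS, hb]
      rw [e, ih false hcs (by simp)]

-- no "__" left when the while loop exits
theorem pvNoDbl_of_not_isIn (s : String) (h : ¬ PySem.Str.isIn "__" s = true) :
    pvHasDbl s.toList = false := by
  cases hd : pvHasDbl s.toList
  · rfl
  · exact absurd (((PySem.Str.isIn_iff_infix (sub := "__") (s := s))).mpr
      (by simpa using (pvInfix_iff_hasDbl s.toList).mpr hd)) h

-- A's while loop computes the collapsed form
theorem pvCollapseLoopA_colS (s : String) : (pvCollapseLoopA s).toList = (pvColS false s.toList).1 := by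
  induction s using pvCollapseLoopA.induct with
  | case1 s h ih =>
    rw [pvCollapseLoopA, dif_pos h, ih]
    have : (PySem.Str.replace s "__" "_").toList = pvRep s.toList := by
      simp [PySem.Str.replace, pvReplace_dbl]
    rw [this, pvColS_rep]
  | case2 s h =>
    rw [pvCollapseLoopA, dif_neg h]
    exact (pvColS_fix s.toList false (pvNoDbl_of_not_isIn s h) (by simp)).symm

-- the two per-name computations agree
theorem pvSan_eq (name : String) : pvSanA name = pvSanB name := by
  apply String.toList_inj.mp
  show (PySem.Str.stripChars _ "_").toList = (PySem.Str.stripChars _ "_").toList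
  simp only [PySem.Str.toList_stripChars]
  congr 1
  rw [pvCollapseLoopA_colS, pvChainA, String.toList_ofList, pvOuter_colS name.toList [] false]
  simp

-- ===== VERDICT (by name: the statement is the Claim_ definition above) =====
theorem sanitize_feature_names_py_spec : Claim_equal_sanitize_feature_names_py := by
  intro feature_names _
  unfold Spec_sanitize_feature_names_py
  unfold sanitize_feature_names_py sanitize_feature_names_py_alt
  simp only [pvSan_eq]
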